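-- pv_equiv track=rewrite | github.com/xmaciejson/university | UWr/WDPP 2024/pracownia 11.py | permutacyjna_postac_normalna
-- ===== SOURCE A (Python) =====
-- def permutacyjna_postac_normalna(word):
--     mapping = {}
--     counter = 1
--     result = []
--
--     for char in word:
--         if char not in mapping:
--             mapping[char] = counter
--             counter += 1
--         result.append(str(mapping[char]))
--
--     return '-'.join(result)
-- ===== SOURCE B (Python) =====
-- def permutacyjna_postac_normalna(word):
--     # rank of a character = number of distinct characters in the prefix of word
--     # ending at that character's FIRST occurrence (computed from scratch per
--     # distinct character via index + a set of a slice; no counter, no incremental map)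
--     rank = {ch: str(len(set(word[:word.index(ch) + 1]))) for ch in set(word)}
--     return '-'.join(rank[ch] for ch in word)
-- ===== Notes on version B (the rewrite author's own statement) =====
-- stated objective: alternative
-- what changed: A numbers characters incrementally with a dict and a running counter in one stateful loop; B has no counter and no incremental numbering: each distinct character's rank is computed independently as the number of distinct characters in the prefix of the word ending at its first occurrence (word.index + set of a slice), memoized per distinct character and then mapped over the word.
import Mathlib
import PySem

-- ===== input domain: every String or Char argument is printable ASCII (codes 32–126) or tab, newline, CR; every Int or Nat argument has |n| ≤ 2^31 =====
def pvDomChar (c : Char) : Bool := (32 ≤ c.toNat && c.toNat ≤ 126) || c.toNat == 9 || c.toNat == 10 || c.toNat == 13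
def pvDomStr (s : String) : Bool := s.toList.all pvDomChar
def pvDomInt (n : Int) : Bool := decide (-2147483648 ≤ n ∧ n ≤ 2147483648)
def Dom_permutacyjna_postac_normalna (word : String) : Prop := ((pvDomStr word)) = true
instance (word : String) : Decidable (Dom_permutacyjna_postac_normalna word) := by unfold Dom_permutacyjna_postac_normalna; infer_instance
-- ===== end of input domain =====

-- B drops A's dict and running counter entirely: each character's rank is recomputed
-- independently as the number of distinct characters in the prefix ending at that
-- character's first occurrence; objective: alternative (same output, stateless algorithm).

-- ===== PORT A =====
-- one iteration of A's for-loop over the state (mapping, counter, result)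
def pvStepA (st : PySem.Dict Char Int × Int × List String) (ch : Char) :
    PySem.Dict Char Int × Int × List String :=
  let mapping := if !(st.1.contains ch) then st.1.insert ch st.2.1 else st.1
  let counter := if !(st.1.contains ch) then st.2.1 + 1 else st.2.1
  (mapping, counter, st.2.2 ++ [PySem.Int.toStr (mapping.getD ch 0)])

def permutacyjna_postac_normalna (word : String) : String :=
  PySem.Str.join "-" (word.toList.foldl pvStepA (PySem.Dict.empty, 1, [])).2.2

-- ===== PORT B =====
-- rank = {ch: str(len(set(word[:word.index(ch) + 1]))) for ch in set(word)}
-- word.index(ch) is the first-occurrence index (ch is always present here, so it equals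
-- List.idxOf); word[:k] with k ≥ 0 is the prefix take k; set(...) is Set.ofList. Python's
-- set(word) iterates in an unspecified order; the entries are independent of that order,
-- so the dict's VALUES (all B reads) are the same; ported in first-occurrence order.
def pvRankB (word : String) : PySem.Dict Char String :=
  (PySem.Set.ofList word.toList).foldl
    (fun d ch => d.insert ch
      (PySem.Int.toStr
        (PySem.Set.len (PySem.Set.ofList (word.toList.take (word.toList.idxOf ch + 1))))))
    PySem.Dict.empty

-- '-'.join(rank[ch] for ch in word); rank[ch] never raises KeyError (ch ∈ set(word))
def permutacyjna_postac_normalna_alt (word : String) : String :=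
  PySem.Str.join "-" (word.toList.map (fun ch => (pvRankB word).getD ch ""))

-- ===== PRECONDITION & SPEC =====
def Spec_permutacyjna_postac_normalna (word : String) (out : String) : Prop := out = permutacyjna_postac_normalna_alt word
instance (word : String) (out : String) : Decidable (Spec_permutacyjna_postac_normalna word out) := by unfold Spec_permutacyjna_postac_normalna; infer_instance

-- ===== CLAIM (what is proved, stated in full; the proofs are below) =====
def Claim_equal_permutacyjna_postac_normalna : Prop := ∀ (word : String), Dom_permutacyjna_postac_normalna word → Spec_permutacyjna_postac_normalna word (permutacyjna_postac_normalna word)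

-- ===== LEMMAS AND PROOFS =====

-- the rank table after the distinct characters u have been seen, the first one valued k
def pvPairs (k : Int) : List Char → List (Char × Int)
  | [] => []
  | c :: t => (c, k) :: pvPairs (k + 1) t

theorem pvPairs_get (u : List Char) (k : Int) (ch : Char) :
    (PySem.Dict.mk (pvPairs k u)).get? ch =
      if ch ∈ u then some (k + (u.idxOf ch : Int)) else none := by
  induction u generalizing k with
  | nil => simp [pvPairs]; rfl
  | cons c t ih =>
    simp only [pvPairs, PySem.Dict.get?_mk_cons]
    by_cases h : c = ch
    · subst h; simp
    · rw [List.idxOf_cons_ne _ (by simpa using h), ih, if_neg (by simpa using h)]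
      by_cases hm : ch ∈ t
      · rw [if_pos hm, if_pos (by simp [hm])]; congr 1; push_cast; ring
      · rw [if_neg hm, if_neg (by simp [hm, Ne.symm h])]

theorem pvPairs_contains (u : List Char) (ch : Char) :
    (PySem.Dict.mk (pvPairs 1 u)).contains ch = decide (ch ∈ u) := by
  rw [PySem.Dict.contains_eq_isSome_get?, pvPairs_get]
  by_cases h : ch ∈ u <;> simp [h]

theorem pvPairs_getD (u : List Char) (ch : Char) (h : ch ∈ u) :
    (PySem.Dict.mk (pvPairs 1 u)).getD ch 0 = (u.idxOf ch : Int) + 1 := by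
  rw [PySem.Dict.getD_eq_get?_getD, pvPairs_get]
  simp [h]; omega

theorem pvPairs_append (u : List Char) (k : Int) (c : Char) :
    pvPairs k (u ++ [c]) = pvPairs k u ++ [(c, k + u.length)] := by
  induction u generalizing k with
  | nil => simp [pvPairs]
  | cons d t ih => simp [pvPairs, ih]; omega

theorem pvPairs_insert (u : List Char) (c : Char) (h : c ∉ u) :
    (PySem.Dict.mk (pvPairs 1 u)).insert c ((u.length : Int) + 1) =
      PySem.Dict.mk (pvPairs 1 (u ++ [c])) := by
  apply PySem.Dict.ext
  rw [PySem.Dict.items_insert_of_not_contains _ _ (by rw [pvPairs_contains]; simp [h])]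
  rw [pvPairs_append]
  simp
  omega

-- one step of Set.update
theorem pvUpdate_cons (s : List Char) (c : Char) (t : List Char) :
    PySem.Set.update s (c :: t) = PySem.Set.update (PySem.Set.add s c) t := by
  simp [PySem.Set.update]

-- Set.update only appends to its first argument
theorem pvUpdate_append (l : List Char) : ∀ s : List Char, ∃ d, PySem.Set.update s l = s ++ d := by
  induction l with
  | nil => intro s; exact ⟨[], by simp [PySem.Set.update]⟩
  | cons c t ih =>
    intro s
    by_cases h : PySem.Set.contains s c = true
    · obtain ⟨d, hd⟩ := ih s
      refine ⟨d, ?_⟩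
      rw [pvUpdate_cons, PySem.Set.add, if_pos h]
      exact hd
    · obtain ⟨d, hd⟩ := ih (s ++ [c])
      refine ⟨c :: d, ?_⟩
      rw [pvUpdate_cons, PySem.Set.add, if_neg h]
      simpa using hd

-- a member's first-occurrence index survives Set.update
theorem pvIdx_update (l s : List Char) (c : Char) (h : c ∈ s) :
    (PySem.Set.update s l).idxOf c = s.idxOf c := by
  obtain ⟨d, hd⟩ := pvUpdate_append l s
  rw [hd, List.idxOf_append_of_mem h]

-- A's loop invariant: starting from the rank table of the distinct characters s seen so far
theorem pvA_loop (l : List Char) : ∀ (s : List Char) (r : List String),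
    (l.foldl pvStepA (PySem.Dict.mk (pvPairs 1 s), (s.length : Int) + 1, r)).2.2 =
      r ++ l.map (fun ch => PySem.Int.toStr (((PySem.Set.update s l).idxOf ch : Int) + 1)) := by
  induction l with
  | nil => intro s r; simp
  | cons c t ih =>
    intro s r
    rw [List.foldl_cons]
    by_cases h : c ∈ s
    · have hc : (PySem.Dict.mk (pvPairs 1 s)).contains c = true := by
        rw [pvPairs_contains]; simp [h]
      have hadd : PySem.Set.add s c = s := by
        rw [PySem.Set.add, if_pos (by simpa [PySem.Set.contains] using h)]
      simp only [pvStepA, hc, Bool.not_true, Bool.false_eq_true, if_false]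
      rw [ih s _, pvPairs_getD s c h, pvUpdate_cons, hadd, List.map_cons,
        pvIdx_update t s c h]
      simp
    · have hc : (PySem.Dict.mk (pvPairs 1 s)).contains c = false := by
        rw [pvPairs_contains]; simp [h]
      have hadd : PySem.Set.add s c = s ++ [c] := by
        rw [PySem.Set.add, if_neg (by simpa [PySem.Set.contains] using h)]
      simp only [pvStepA, hc, Bool.not_false, if_true]
      rw [pvPairs_insert s c h]
      have hmem : c ∈ s ++ [c] := by simp
      have hlen : ((s.length : Int) + 1) + 1 = (((s ++ [c]).length : Nat) : Int) + 1 := by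
        simp
      rw [hlen, ih (s ++ [c]) _, pvPairs_getD _ c hmem, pvUpdate_cons, hadd,
        List.map_cons, pvIdx_update t (s ++ [c]) c hmem]
      simp [List.idxOf_append, h]

-- B's key fact: the number of distinct characters in the prefix of l ending at ch's
-- first occurrence equals ch's first-occurrence rank among the distinct characters
theorem pvPrefix_len (l : List Char) : ∀ (s : List Char) (ch : Char), ch ∉ s → ch ∈ l →
    (PySem.Set.update s (l.take (l.idxOf ch + 1))).length =
      (PySem.Set.update s l).idxOf ch + 1 := by
  induction l with
  | nil => intro s ch _ h; simp at h
  | cons c t ih =>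
    intro s ch hs hl
    by_cases h : c = ch
    · subst h
      have hcont : PySem.Set.contains s c = false := by
        simpa [PySem.Set.contains] using hs
      have hadd : PySem.Set.add s c = s ++ [c] := by rw [PySem.Set.add, if_neg (by rw [hcont]; simp)]
      rw [List.idxOf_cons_self]
      simp only [List.take_succ_cons, List.take_zero]
      rw [PySem.Set.update, List.foldl_cons, hadd]
      simp only [List.foldl_nil]
      rw [pvUpdate_cons, hadd]
      obtain ⟨d, hd⟩ := pvUpdate_append t (s ++ [c])
      rw [hd, List.idxOf_append_of_mem (by simp)]
      rw [List.idxOf_append, if_neg hs]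
      simp
    · have hne : ch ≠ c := Ne.symm h
      have hlt : ch ∈ t := by
        rcases List.mem_cons.mp hl with h' | h'
        · exact absurd h'.symm h
        · exact h'
      rw [List.idxOf_cons_ne _ (by simpa using h)]
      have htake : (c :: t).take (t.idxOf ch + 1 + 1) = c :: t.take (t.idxOf ch + 1) := by
        simp
      rw [htake, pvUpdate_cons, pvUpdate_cons s c t]
      have hs' : ch ∉ PySem.Set.add s c := by
        rw [PySem.Set.add]
        split_ifs with hcc
        · exact hs
        · simp [hs, hne]
      exact ih (PySem.Set.add s c) ch hs' hlt

-- a value-by-key dict built from key-determined values reads back the value function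
theorem pvAssoc_getD (u : List Char) (f : Char → String) (ch : Char) (h : ch ∈ u) :
    (PySem.Dict.mk (u.map (fun c => (c, f c)))).getD ch "" = f ch := by
  induction u with
  | nil => simp at h
  | cons c t ih =>
    rw [List.map_cons, PySem.Dict.getD_eq_get?_getD, PySem.Dict.get?_mk_cons]
    by_cases hc : c = ch
    · subst hc; simp
    · rw [if_neg (by simpa using hc), ← PySem.Dict.getD_eq_get?_getD]
      exact ih (by
        rcases List.mem_cons.mp h with h' | h'
        · exact absurd h'.symm hc
        · exact h')

-- B's dict holds exactly the prefix-distinct-count string for every character of word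
theorem pvRankB_getD (word : String) (ch : Char) (h : ch ∈ word.toList) :
    (pvRankB word).getD ch "" =
      PySem.Int.toStr
        (PySem.Set.len (PySem.Set.ofList (word.toList.take (word.toList.idxOf ch + 1)))) := by
  have hitems := PySem.Dict.items_foldl_insert_fresh (PySem.Set.ofList word.toList)
    (fun c => c)
    (fun c => PySem.Int.toStr
      (PySem.Set.len (PySem.Set.ofList (word.toList.take (word.toList.idxOf c + 1)))))
    PySem.Dict.empty
    (by intro a _; simp [PySem.Dict.contains_empty])
    (by simp [PySem.Set.nodup_ofList])
  have hmk : pvRankB word = PySem.Dict.mk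
      ((PySem.Set.ofList word.toList).map (fun c => (c,
        PySem.Int.toStr
          (PySem.Set.len (PySem.Set.ofList (word.toList.take (word.toList.idxOf c + 1))))))) := by
    apply PySem.Dict.ext
    simpa [PySem.Dict.items] using hitems
  rw [hmk]
  exact pvAssoc_getD _ _ ch ((PySem.Set.mem_ofList _ _).mpr h)

-- ===== VERDICT (by name: the statement is the Claim_ definition above) =====
theorem permutacyjna_postac_normalna_spec : Claim_equal_permutacyjna_postac_normalna := by
  intro word _
  unfold Spec_permutacyjna_postac_normalna
  unfold permutacyjna_postac_normalna permutacyjna_postac_normalna_alt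
  have hA := pvA_loop word.toList [] []
  simp only [pvPairs, List.length_nil, Nat.cast_zero, zero_add] at hA
  have hempty : (PySem.Dict.empty : PySem.Dict Char Int) = PySem.Dict.mk [] := rfl
  rw [hempty, hA]
  congr 1
  simp only [List.nil_append]
  apply List.map_congr_left
  intro ch hch
  rw [pvRankB_getD word ch (by simpa using hch)]
  have hB : PySem.Set.ofList (word.toList.take (word.toList.idxOf ch + 1)) =
      PySem.Set.update [] (word.toList.take (word.toList.idxOf ch + 1)) := by
    rw [PySem.Set.ofList_eq_foldl]; rfl
  rw [hB]
  have hkey := pvPrefix_len word.toList [] ch (by simp) (by simpa using hch)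
  rw [PySem.Set.len, hkey]
  push_cast
  ring_nf
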